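-- pv_equiv track=rewrite | github.com/minty14/superjbot | bot/utils/embeds.py | number_to_emojis
-- ===== SOURCE A (Python) =====
-- def number_to_emojis(number):
--
--     num_emojis = {
--         "1":":one:",
--         "2":":two:",
--         "3":":three:",
--         "4":":four:",
--         "5":":five:",
--         "6":":six:",
--         "7":":seven:",
--         "8":":eight:",
--         "9":":nine:",
--         "0":":zero:"
--     }
--
--     for k, v in num_emojis.items():
--         number = (str(number)).replace(k, v)
--
--     return number
-- ===== SOURCE B (Python) =====
-- def number_to_emojis(number):
--     def emoji(c):
--         if c == '0': return ':zero:'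
--         elif c == '1': return ':one:'
--         elif c == '2': return ':two:'
--         elif c == '3': return ':three:'
--         elif c == '4': return ':four:'
--         elif c == '5': return ':five:'
--         elif c == '6': return ':six:'
--         elif c == '7': return ':seven:'
--         elif c == '8': return ':eight:'
--         elif c == '9': return ':nine:'
--         else: return c
--     out = ''
--     for c in str(number):
--         out += emoji(c)
--     return out
-- ===== Notes on version B (the rewrite author's own statement) =====
-- stated objective: simpler
-- what changed: Replaces A's ten successive full-string .replace scans (one per dict item) by a single accumulating loop over the characters of str(number), mapping each character to its emoji name with a plain if/elif chain (no dict, no replace).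
import Mathlib
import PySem

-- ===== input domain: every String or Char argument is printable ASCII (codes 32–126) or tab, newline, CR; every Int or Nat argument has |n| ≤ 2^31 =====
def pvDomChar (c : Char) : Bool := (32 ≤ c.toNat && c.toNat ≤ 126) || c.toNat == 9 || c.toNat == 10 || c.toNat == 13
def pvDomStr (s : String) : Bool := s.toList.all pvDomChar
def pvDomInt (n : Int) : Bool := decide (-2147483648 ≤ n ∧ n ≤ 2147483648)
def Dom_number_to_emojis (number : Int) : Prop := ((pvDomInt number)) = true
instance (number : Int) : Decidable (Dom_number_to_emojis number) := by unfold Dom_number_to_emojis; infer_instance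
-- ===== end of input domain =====

-- B replaces A's ten successive full-string .replace scans by one accumulating loop over the
-- characters of str(number) with an if/elif digit→emoji chain (objective: simpler, one pass).

-- ===== PORT A =====
-- the num_emojis dict literal of A
def pvNumEmojis : PySem.Dict String String := PySem.Dict.ofList
  [("1", ":one:"), ("2", ":two:"), ("3", ":three:"), ("4", ":four:"), ("5", ":five:"),
   ("6", ":six:"), ("7", ":seven:"), ("8", ":eight:"), ("9", ":nine:"), ("0", ":zero:")]

-- A rebinds `number` to str(number) on the first loop step and str() is the identity on str
-- thereafter, so the port applies str once before the fold over the dict items.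
def number_to_emojis (number : Int) : String :=
  pvNumEmojis.items.foldl (fun s kv => PySem.Str.replace s kv.1 kv.2) (PySem.Int.toStr number)

-- ===== PORT B =====
-- the inner helper `emoji(c)`: if/elif chain, self for non-digits
def pvEmoji (c : Char) : List Char :=
  if c = '0' then ":zero:".toList
  else if c = '1' then ":one:".toList
  else if c = '2' then ":two:".toList
  else if c = '3' then ":three:".toList
  else if c = '4' then ":four:".toList
  else if c = '5' then ":five:".toList
  else if c = '6' then ":six:".toList
  else if c = '7' then ":seven:".toList
  else if c = '8' then ":eight:".toList
  else if c = '9' then ":nine:".toList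
  else [c]

-- the accumulating `out += emoji(c)` loop
def pvEmojiLoop (out : List Char) : List Char → List Char
  | [] => out
  | c :: rest => pvEmojiLoop (out ++ pvEmoji c) rest

def number_to_emojis_alt (number : Int) : String :=
  String.ofList (pvEmojiLoop [] (PySem.Int.toChars number))

-- ===== PRECONDITION & SPEC =====
def Spec_number_to_emojis (number : Int) (out : String) : Prop := out = number_to_emojis_alt number
instance (number : Int) (out : String) : Decidable (Spec_number_to_emojis number out) := by unfold Spec_number_to_emojis; infer_instance

-- ===== CLAIM (what is proved, stated in full; the proofs are below) =====
def Claim_equal_number_to_emojis : Prop := ∀ (number : Int), Dom_number_to_emojis number → Spec_number_to_emojis number (number_to_emojis number)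

-- ===== LEMMAS AND PROOFS =====

-- the per-character view of str.replace with a single-char pattern
def pvSub (k : Char) (v : List Char) (c : Char) : List Char := if c = k then v else [c]

theorem pv_go_single (k : Char) (v : List Char) :
    ∀ (l : List Char) (fuel : Nat) (acc : List Char), l.length ≤ fuel →
      PySem.Chars.replace.go [k] v fuel l acc = acc.reverse ++ l.flatMap (pvSub k v) := by
  intro l
  induction l with
  | nil =>
      intro fuel acc _
      cases fuel <;> simp [PySem.Chars.replace.go]
  | cons c t ih =>
      intro fuel acc h
      cases fuel with
      | zero => simp at h
      | succ n =>
        simp only [PySem.Chars.replace.go]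
        by_cases hck : c = k
        · subst hck
          rw [if_pos (by simp [List.isPrefixOf])]
          simp only [List.length_cons, List.length_nil, List.drop_succ_cons, List.drop_zero]
          rw [ih n (v.reverse ++ acc) (by simpa using h)]
          simp [pvSub]
        · rw [if_neg (by simp [List.isPrefixOf, Ne.symm hck])]
          rw [ih n (c :: acc) (by simpa using h)]
          simp [pvSub, hck]

theorem pv_replace_single (cs : List Char) (k : Char) (v : List Char) :
    PySem.Chars.replace cs [k] v = cs.flatMap (pvSub k v) := by
  rw [PySem.Chars.replace]
  rw [if_neg (by simp)]
  exact pv_go_single k v cs cs.length [] le_rfl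

-- B's loop is the flatMap of pvEmoji
theorem pv_loop_eq (l : List Char) : ∀ out, pvEmojiLoop out l = out ++ l.flatMap pvEmoji := by
  induction l with
  | nil => intro out; simp [pvEmojiLoop]
  | cons c rest ih => intro out; rw [pvEmojiLoop, ih]; simp

-- the ten-fold composition of A's replaces acts per character exactly as B's if/elif chain
theorem pv_char_step (c : Char) :
    ((((((((((pvSub '1' ":one:".toList c).flatMap (pvSub '2' ":two:".toList)).flatMap
      (pvSub '3' ":three:".toList)).flatMap (pvSub '4' ":four:".toList)).flatMap
      (pvSub '5' ":five:".toList)).flatMap (pvSub '6' ":six:".toList)).flatMap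
      (pvSub '7' ":seven:".toList)).flatMap (pvSub '8' ":eight:".toList)).flatMap
      (pvSub '9' ":nine:".toList)).flatMap (pvSub '0' ":zero:".toList))
    = pvEmoji c := by
  by_cases h1 : c = '1'; · subst h1; decide
  by_cases h2 : c = '2'; · subst h2; decide
  by_cases h3 : c = '3'; · subst h3; decide
  by_cases h4 : c = '4'; · subst h4; decide
  by_cases h5 : c = '5'; · subst h5; decide
  by_cases h6 : c = '6'; · subst h6; decide
  by_cases h7 : c = '7'; · subst h7; decide
  by_cases h8 : c = '8'; · subst h8; decide
  by_cases h9 : c = '9'; · subst h9; decide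
  by_cases h0 : c = '0'; · subst h0; decide
  simp [pvSub, pvEmoji, h1, h2, h3, h4, h5, h6, h7, h8, h9, h0]

-- ===== VERDICT (by name: the statement is the Claim_ definition above) =====
theorem number_to_emojis_spec : Claim_equal_number_to_emojis := by
  intro number _
  unfold Spec_number_to_emojis
  apply String.ext
  rw [number_to_emojis, number_to_emojis_alt]
  rw [show pvNumEmojis.items = [("1", ":one:"), ("2", ":two:"), ("3", ":three:"), ("4", ":four:"),
        ("5", ":five:"), ("6", ":six:"), ("7", ":seven:"), ("8", ":eight:"), ("9", ":nine:"),
        ("0", ":zero:")] from by decide]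
  simp only [List.foldl]
  rw [PySem.Str.toList_replace, PySem.Str.toList_replace, PySem.Str.toList_replace,
      PySem.Str.toList_replace, PySem.Str.toList_replace, PySem.Str.toList_replace,
      PySem.Str.toList_replace, PySem.Str.toList_replace, PySem.Str.toList_replace,
      PySem.Str.toList_replace]
  rw [show ("1" : String).toList = ['1'] from rfl, show ("2" : String).toList = ['2'] from rfl,
      show ("3" : String).toList = ['3'] from rfl, show ("4" : String).toList = ['4'] from rfl,
      show ("5" : String).toList = ['5'] from rfl, show ("6" : String).toList = ['6'] from rfl,
      show ("7" : String).toList = ['7'] from rfl, show ("8" : String).toList = ['8'] from rfl,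
      show ("9" : String).toList = ['9'] from rfl, show ("0" : String).toList = ['0'] from rfl]
  rw [pv_replace_single, pv_replace_single, pv_replace_single, pv_replace_single,
      pv_replace_single, pv_replace_single, pv_replace_single, pv_replace_single,
      pv_replace_single, pv_replace_single]
  rw [pv_loop_eq, List.nil_append, PySem.Int.toList_toStr]
  simp only [String.toList_ofList, List.flatMap_assoc]
  apply List.flatMap_congr
  intro c _
  rw [← pv_char_step c]
  simp only [List.flatMap_assoc]
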